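-- pv_equiv track=rewrite | github.com/LavergneC/pythonFlashCard | tests/test_data/test_generate_exercise_resources/test_resource_3.py | str_to_sentences
-- ===== SOURCE A (Python) =====
-- import string
--
-- def str_to_sentences(long_str: str) -> list[str]:
--     """
--     split the given string on punctuation symbols
--     """
--     sentences = []
--     current_sentence = ""
--
--     for current_char in long_str:
--         if current_char in string.punctuation:
--             sentences.append(current_sentence)
--             current_sentence = ""
--         else:
--             current_sentence += current_char
--
--     if current_sentence:
--         sentences.append(current_sentence)
--
--     return sentences
-- ===== SOURCE B (Python) =====
-- import re
-- import string
--
-- def str_to_sentences(long_str: str) -> list[str]: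
--     """
--     split the given string on punctuation symbols
--     """
--     parts = re.split("[" + re.escape(string.punctuation) + "]", long_str)
--     if parts[-1] == "":
--         parts.pop()  # strip trailing empty field
--     return parts
-- ===== Notes on version B (the rewrite author's own statement) =====
-- stated objective: idiomatic
-- what changed: Replaces A's explicit character loop with per-character string append by a single regex split on the punctuation character class followed by dropping the trailing empty field.
import Mathlib
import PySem

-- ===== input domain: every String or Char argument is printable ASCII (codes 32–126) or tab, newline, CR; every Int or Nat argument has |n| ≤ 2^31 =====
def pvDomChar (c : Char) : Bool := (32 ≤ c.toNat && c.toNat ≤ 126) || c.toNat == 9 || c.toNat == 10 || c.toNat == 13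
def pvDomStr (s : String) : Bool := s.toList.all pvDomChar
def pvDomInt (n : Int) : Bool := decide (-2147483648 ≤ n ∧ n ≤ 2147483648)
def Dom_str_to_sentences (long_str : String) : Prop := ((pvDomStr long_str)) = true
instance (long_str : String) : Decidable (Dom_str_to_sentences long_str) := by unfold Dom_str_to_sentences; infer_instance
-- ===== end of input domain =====

-- B replaces A's char-by-char accumulate-and-append loop by one library split on the
-- punctuation class plus a trailing-empty-field trim (objective: idiomatic).

-- string.punctuation
def punctChars : List Char := "!\"#$%&'()*+,-./:;<=>?@[\\]^_`{|}~".toList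

def isPunct (c : Char) : Bool := c ∈ punctChars

-- ===== PORT A =====
-- state: (sentences, current_sentence), both over List Char
def stepA (st : List (List Char) × List Char) (c : Char) : List (List Char) × List Char :=
  if isPunct c then (st.1 ++ [st.2], []) else (st.1, st.2 ++ [c])

def str_to_sentences (long_str : String) : List String :=
  let st := long_str.toList.foldl stepA ([], [])
  (if st.2 = [] then st.1 else st.1 ++ [st.2]).map String.ofList

-- ===== PORT B =====
-- re.split on the punctuation character class: N delimiters give N+1 segments
def splitPunct : List Char → List (List Char)
  | [] => [[]]
  | c :: cs =>
    if isPunct c then [] :: splitPunct cs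
    else
      match splitPunct cs with
      | [] => [[c]]          -- unreachable: splitPunct is never []
      | s :: rest => (c :: s) :: rest

def str_to_sentences_alt (long_str : String) : List String :=
  let parts := splitPunct long_str.toList
  (if parts.getLast! = [] then parts.dropLast else parts).map String.ofList

-- ===== PRECONDITION & SPEC =====
def Spec_str_to_sentences (long_str : String) (out : List String) : Prop := out = str_to_sentences_alt long_str
instance (long_str : String) (out : List String) : Decidable (Spec_str_to_sentences long_str out) := by unfold Spec_str_to_sentences; infer_instance

-- ===== CLAIM (what is proved, stated in full; the proofs are below) =====
def Claim_equal_str_to_sentences : Prop := ∀ (long_str : String), Dom_str_to_sentences long_str → Spec_str_to_sentences long_str (str_to_sentences long_str)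

-- ===== LEMMAS AND PROOFS =====

def finishA (st : List (List Char) × List Char) : List (List Char) :=
  if st.2 = [] then st.1 else st.1 ++ [st.2]

def finishB (segs : List (List Char)) : List (List Char) :=
  if segs.getLast! = [] then segs.dropLast else segs

theorem splitPunct_ne_nil (cs : List Char) : splitPunct cs ≠ [] := by
  cases cs with
  | nil => simp [splitPunct]
  | cons c cs =>
    simp only [splitPunct]
    split
    · simp
    · cases h : splitPunct cs <;> simp

theorem finishB_cons (s : List Char) (segs : List (List Char)) (h : segs ≠ []) :
    finishB (s :: segs) = s :: finishB segs := by
  cases segs with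
  | nil => exact absurd rfl h
  | cons t ts =>
    unfold finishB
    simp [List.getLast!]
    split <;> rfl

theorem fold_eq (cs : List Char) : ∀ (acc : List (List Char)) (cur : List Char),
    finishA (cs.foldl stepA (acc, cur)) =
      acc ++ finishB (match splitPunct cs with
                      | [] => [cur]
                      | s :: rest => (cur ++ s) :: rest) := by
  induction cs with
  | nil =>
    intro acc cur
    simp only [splitPunct, List.foldl_nil, finishA, finishB]
    cases cur <;> simp [List.getLast!]
  | cons c cs ih =>
    intro acc cur
    simp only [List.foldl_cons, stepA, splitPunct]
    by_cases hp : isPunct c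
    · simp only [hp, if_true]
      rw [ih]
      have hne := splitPunct_ne_nil cs
      cases h : splitPunct cs with
      | nil => exact absurd h hne
      | cons s rest =>
        have : finishB (cur :: (s :: rest)) = cur :: finishB (s :: rest) :=
          finishB_cons _ _ (by simp)
        simp [this]
    · simp only [hp]
      rw [ih]
      cases h : splitPunct cs with
      | nil => exact absurd h (splitPunct_ne_nil cs)
      | cons s rest => simp

-- ===== VERDICT (by name: the statement is the Claim_ definition above) =====
theorem str_to_sentences_spec : Claim_equal_str_to_sentences := by
  intro long_str _
  show str_to_sentences long_str = str_to_sentences_alt long_str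
  unfold str_to_sentences str_to_sentences_alt
  have h := fold_eq long_str.toList [] []
  simp only [List.nil_append] at h
  have hB : (match splitPunct long_str.toList with
             | [] => [([] : List Char)]
             | s :: rest => s :: rest) = splitPunct long_str.toList := by
    cases h' : splitPunct long_str.toList with
    | nil => exact absurd h' (splitPunct_ne_nil _)
    | cons s rest => simp
  rw [hB] at h
  show (finishA (long_str.toList.foldl stepA ([], []))).map String.ofList
      = (finishB (splitPunct long_str.toList)).map String.ofList
  rw [h]
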